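-- pv_equiv track=rewrite | github.com/madscatt/zazmol | src/python/test_sasmol/test_subset/test_unit_subset_Mask_get_dihedral_subset_mask.py | rna_expected_mask
-- ===== SOURCE A (Python) =====
-- def rna_expected_mask(flexible_residues, resids, names):
--     expected = []
--     for residue in flexible_residues:
--         row = []
--         for atom_resid, atom_name in zip(resids, names):
--             include = (
--                 (atom_resid == residue - 1 and atom_name == "O3'") or
--                 (atom_resid == residue and atom_name in
--                  ["P", "O5'", "C5'", "C4'", "C3'", "O3'"]) or
--                 (atom_resid == residue + 1 and atom_name == 'P') or
--                 (atom_resid == residue + 1 and atom_name == "O5'")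
--             )
--             row.append(1 if include else 0)
--         expected.append(row)
--     return expected
-- ===== SOURCE B (Python) =====
-- def rna_expected_mask(flexible_residues, resids, names):
--     # Group atom positions by resid once, then touch only the three relevant
--     # buckets (residue-1, residue, residue+1) per flexible residue.
--     groups = {}
--     for i, (r, n) in enumerate(zip(resids, names)):
--         groups.setdefault(r, []).append((i, n))
--     rules = [(-1, ("O3'",)),
--              (0, ("P", "O5'", "C5'", "C4'", "C3'", "O3'")),
--              (1, ("P", "O5'"))]
--     m = min(len(resids), len(names))
--     expected = []
--     for residue in flexible_residues:
--         row = [0] * m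
--         for offset, allowed in rules:
--             for i, n in groups.get(residue + offset, []):
--                 if n in allowed:
--                     row[i] = 1
--         expected.append(row)
--     return expected
-- ===== Notes on version B (the rewrite author's own statement) =====
-- stated objective: faster
-- what changed: Instead of rescanning every atom for each flexible residue, B builds a dict grouping atom positions by resid once, then fills each zero row by visiting only the three relevant resid buckets (residue-1/residue/residue+1) with their per-offset name rules.
import Mathlib
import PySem

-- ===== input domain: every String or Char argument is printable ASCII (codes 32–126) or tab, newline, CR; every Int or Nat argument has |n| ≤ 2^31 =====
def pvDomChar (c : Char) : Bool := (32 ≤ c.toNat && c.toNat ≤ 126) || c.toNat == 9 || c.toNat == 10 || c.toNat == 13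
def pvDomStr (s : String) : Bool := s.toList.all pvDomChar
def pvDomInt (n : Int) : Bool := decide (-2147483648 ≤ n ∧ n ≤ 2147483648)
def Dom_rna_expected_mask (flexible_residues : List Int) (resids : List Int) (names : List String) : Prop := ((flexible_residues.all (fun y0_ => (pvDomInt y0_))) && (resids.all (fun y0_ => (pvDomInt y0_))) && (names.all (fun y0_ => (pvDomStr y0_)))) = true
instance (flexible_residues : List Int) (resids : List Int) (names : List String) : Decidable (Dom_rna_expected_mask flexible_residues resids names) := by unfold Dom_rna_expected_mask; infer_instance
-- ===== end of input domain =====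

-- B groups atom positions by resid in a dict once and fills each zero row from the
-- three relevant buckets, instead of rescanning every atom per flexible residue (alternative decomposition).


-- ===== PORT A =====
def rna_expected_mask (flexible_residues : List Int) (resids : List Int) (names : List String) : List (List Int) :=
  flexible_residues.foldl (fun expected residue =>
    expected ++ [(resids.zip names).foldl (fun row p =>
      row ++ [if ((p.1 == residue - 1 && p.2 == "O3'")
                || (p.1 == residue && ["P", "O5'", "C5'", "C4'", "C3'", "O3'"].contains p.2)
                || (p.1 == residue + 1 && p.2 == "P")
                || (p.1 == residue + 1 && p.2 == "O5'")) then (1 : Int) else 0]) []]) []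

-- ===== PORT B =====
def rna_expected_mask_alt (flexible_residues : List Int) (resids : List Int) (names : List String) : List (List Int) :=
  let groups : PySem.Dict Int (List (Int × String)) :=
    (PySem.List.enumerate (resids.zip names) 0).foldl
      (fun d q => d.modify q.2.1 [] (· ++ [(q.1, q.2.2)])) PySem.Dict.empty
  let rules : List (Int × List String) :=
    [(-1, ["O3'"]), (0, ["P", "O5'", "C5'", "C4'", "C3'", "O3'"]), (1, ["P", "O5'"])]
  let m := min resids.length names.length
  flexible_residues.foldl (fun expected residue =>
    expected ++ [rules.foldl (fun row rule =>
      (groups.getD (residue + rule.1) []).foldl (fun row p =>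
        if rule.2.contains p.2 then PySem.List.pySetD row p.1 1 else row) row)
      (List.replicate m (0 : Int))]) []

-- ===== PRECONDITION & SPEC =====
def Spec_rna_expected_mask (flexible_residues : List Int) (resids : List Int) (names : List String) (out : List (List Int)) : Prop := out = rna_expected_mask_alt flexible_residues resids names
instance (flexible_residues : List Int) (resids : List Int) (names : List String) (out : List (List Int)) : Decidable (Spec_rna_expected_mask flexible_residues resids names out) := by unfold Spec_rna_expected_mask; infer_instance

-- ===== CLAIM (what is proved, stated in full; the proofs are below) =====
def Claim_equal_rna_expected_mask : Prop := ∀ (flexible_residues : List Int) (resids : List Int) (names : List String), Dom_rna_expected_mask flexible_residues resids names → Spec_rna_expected_mask flexible_residues resids names (rna_expected_mask flexible_residues resids names)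

-- ===== LEMMAS AND PROOFS =====

-- the conditional-write inner loop of B: it preserves length
lemma writeFold_length (entries : List (Int × String)) (allowed : List String) (row : List Int) :
    (entries.foldl (fun row p => if allowed.contains p.2 then PySem.List.pySetD row p.1 1 else row) row).length
      = row.length := by
  induction entries generalizing row with
  | nil => rfl
  | cons p rest ih =>
    simp only [List.foldl_cons]
    split
    · rw [ih, PySem.List.length_pySetD]
    · exact ih row

-- the conditional-write inner loop of B, read back at position j (entries carry nonnegative indices)
lemma writeFold_get (entries : List (Int × String)) (allowed : List String) (row : List Int) (j : Nat)
    (hnn : ∀ p ∈ entries, 0 ≤ p.1) :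
    (entries.foldl (fun row p => if allowed.contains p.2 then PySem.List.pySetD row p.1 1 else row) row)[j]?
      = if (entries.any (fun p => p.1.toNat == j && allowed.contains p.2)) ∧ j < row.length
        then some 1 else row[j]? := by
  induction entries generalizing row with
  | nil => simp
  | cons p rest ih =>
    have hp : (0:Int) ≤ p.1 := hnn p (by simp)
    have hrest : ∀ q ∈ rest, (0:Int) ≤ q.1 := fun q hq => hnn q (by simp [hq])
    simp only [List.foldl_cons, List.any_cons]
    by_cases hc : allowed.contains p.2
    · rw [if_pos hc, ih _ hrest]
      rw [PySem.List.pySetD_of_nonneg _ _ hp]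
      by_cases hj : j < row.length
      · by_cases hij : p.1.toNat = j
        · subst hij
          have hset : (row.set p.1.toNat 1)[p.1.toNat]? = some 1 := by
            simp [hj]
          have hc' : p.2 ∈ allowed := by simpa using hc
          simp only [List.length_set, hset]
          split <;> simp [hc', hj]
        · have hb : (p.1.toNat == j) = false := by simpa using hij
          simp only [List.getElem?_set, List.length_set, hij, if_false, hb,
            Bool.false_and, Bool.false_or]
      · simp [hj, List.length_set]
    · rw [if_neg hc, ih _ hrest]
      simp only [hc, Bool.and_false, Bool.false_or]

-- B's grouping dict, read back: the bucket of resid c lists (position, name) of the atoms with that resid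
lemma groups_getD (zs : List (Int × String)) (c : Int) :
    (((PySem.List.enumerate zs 0).foldl
        (fun d q => d.modify q.2.1 [] (· ++ [(q.1, q.2.2)])) PySem.Dict.empty).getD c [])
      = ((PySem.List.enumerate zs 0).filter (fun q => q.2.1 == c)).map (fun q => (q.1, q.2.2)) := by
  have h := PySem.Dict.getD_foldl_modify_append
    ((PySem.List.enumerate zs 0).map (fun q => (q.2.1, (q.1, q.2.2)))) PySem.Dict.empty c
  rw [List.foldl_map] at h
  simpa [List.filter_map, List.map_map, Function.comp] using h

-- bucket entries carry nonnegative positions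
lemma bucket_nonneg (zs : List (Int × String)) (c : Int) :
    ∀ p ∈ ((PySem.List.enumerate zs 0).filter (fun q => q.2.1 == c)).map (fun q => (q.1, q.2.2)),
      (0:Int) ≤ p.1 := by
  intro p hp
  simp only [List.mem_map, List.mem_filter, PySem.List.mem_enumerate_iff] at hp
  obtain ⟨q, ⟨⟨k, hk, rfl⟩, -⟩, rfl⟩ := hp
  simp

-- whether bucket c writes a 1 at position j, as a predicate on the atom at j
lemma bucket_any (zs : List (Int × String)) (c : Int) (allowed : List String) (j : Nat)
    (hj : j < zs.length) :
    ((((PySem.List.enumerate zs 0).filter (fun q => q.2.1 == c)).map (fun q => (q.1, q.2.2))).any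
        (fun p => p.1.toNat == j && allowed.contains p.2))
      = ((zs[j].1 == c) && allowed.contains zs[j].2) := by
  rw [List.any_map, List.any_filter, Bool.eq_iff_iff]
  simp only [List.any_eq_true, PySem.List.mem_enumerate_iff, Function.comp]
  constructor
  · rintro ⟨p, ⟨k, hk, rfl⟩, hpred⟩
    simp only [Bool.and_eq_true, beq_iff_eq, zero_add, Int.toNat_natCast] at hpred
    obtain ⟨h1, h2, h3⟩ := hpred
    subst h2
    simp only [Bool.and_eq_true, beq_iff_eq]
    exact ⟨h1, h3⟩
  · intro h
    simp only [Bool.and_eq_true, beq_iff_eq] at h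
    refine ⟨((0:Int) + (j:Nat), zs[j]), ⟨j, hj, rfl⟩, ?_⟩
    simp only [Bool.and_eq_true, beq_iff_eq, zero_add, Int.toNat_natCast]
    exact ⟨h.1, trivial, h.2⟩

-- the two per-atom inclusion conditions coincide
set_option maxHeartbeats 1600000 in
lemma cond_eq (residue r : Int) (n : String) :
    (if (r == residue + 1 && ((["P", "O5'"] : List String).contains n)) = true then (1:Int)
     else if (r == residue + 0
              && ((["P", "O5'", "C5'", "C4'", "C3'", "O3'"] : List String).contains n)) = true then 1
     else if (r == residue + -1 && ((["O3'"] : List String).contains n)) = true then 1 else 0)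
  = (if ((r == residue - 1 && n == "O3'")
        || (r == residue && (["P", "O5'", "C5'", "C4'", "C3'", "O3'"] : List String).contains n)
        || (r == residue + 1 && n == "P")
        || (r == residue + 1 && n == "O5'")) = true then (1:Int) else 0) := by
  have e1 : residue + -1 = residue - 1 := by ring
  simp only [e1, add_zero, List.contains_cons, List.contains_nil, Bool.or_false, beq_iff_eq,
    Bool.and_eq_true, Bool.or_eq_true]
  split_ifs <;> tauto

theorem rna_expected_mask_spec : Claim_equal_rna_expected_mask := by
  intro flex resids names _
  unfold Spec_rna_expected_mask rna_expected_mask rna_expected_mask_alt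
  simp only [PySem.List.foldl_append_singleton_eq_map, List.nil_append,
    List.foldl_cons, List.foldl_nil]
  apply List.map_congr_left
  intro residue _
  set zs := resids.zip names with hzs
  have hmz : zs.length = min resids.length names.length := List.length_zip
  rw [groups_getD, groups_getD, groups_getD]
  apply List.ext_getElem?
  intro j
  have hlen1 : ∀ (allowed : List String) (c : Int) (row : List Int),
      ((((PySem.List.enumerate zs 0).filter (fun q => q.2.1 == c)).map
          (fun q => (q.1, q.2.2))).foldl
        (fun row p => if allowed.contains p.2 then PySem.List.pySetD row p.1 1 else row) row).length
        = row.length := fun allowed c row => writeFold_length _ allowed row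
  by_cases hj : j < zs.length
  · have hjm : j < min resids.length names.length := hmz ▸ hj
    rw [writeFold_get _ _ _ _ (bucket_nonneg zs _), writeFold_get _ _ _ _ (bucket_nonneg zs _),
      writeFold_get _ _ _ _ (bucket_nonneg zs _)]
    simp only [hlen1, List.length_replicate, hjm, and_true]
    rw [bucket_any zs _ _ j hj, bucket_any zs _ _ j hj, bucket_any zs _ _ j hj]
    rw [List.getElem?_map, List.getElem?_eq_getElem hj, List.getElem?_replicate]
    simp only [Option.map_some, hjm, if_pos]
    rw [show (some (if ((zs[j].1 == residue - 1 && zs[j].2 == "O3'")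
        || (zs[j].1 == residue && (["P", "O5'", "C5'", "C4'", "C3'", "O3'"] : List String).contains zs[j].2)
        || (zs[j].1 == residue + 1 && zs[j].2 == "P")
        || (zs[j].1 == residue + 1 && zs[j].2 == "O5'")) = true then (1:Int) else 0))
      = some (if (zs[j].1 == residue + 1 && ((["P", "O5'"] : List String).contains zs[j].2)) = true then (1:Int)
         else if (zs[j].1 == residue + 0
                  && ((["P", "O5'", "C5'", "C4'", "C3'", "O3'"] : List String).contains zs[j].2)) = true then 1
         else if (zs[j].1 == residue + -1 && ((["O3'"] : List String).contains zs[j].2)) = true then 1 else 0)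
      from congrArg some (cond_eq residue zs[j].1 zs[j].2).symm]
    split_ifs <;> rfl
  · rw [List.getElem?_eq_none, List.getElem?_eq_none]
    · simp only [hlen1, List.length_replicate]; omega
    · simp only [List.length_map]; omega
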